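-- pv_equiv track=rewrite | github.com/useblocks/sphinx-needs | sphinx_needs/lsp/esbonio.py | col_to_word_index
-- ===== SOURCE A (Python) =====
-- from typing import List, Optional, Tuple, Union
--
-- def col_to_word_index(col: int, words: List[str]) -> int:
--     """Return the index of a word in a list of words for a given line character column."""
--     length = 0
--     index = 0
--     for word in words:
--         length = length + len(word)
--         if col <= length + index:
--             return index
--         index = index + 1
--     return index - 1
-- ===== SOURCE B (Python) =====
-- def col_to_word_index(col, words):
--     """Return the index of a word in a list of words for a given line character column."""
--     # boundaries[i] = end column of words[i] counting one separator column per gap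
--     boundaries = []
--     total = -1
--     for w in words:
--         total += len(w) + 1
--         boundaries.append(total)
--     # binary search: smallest index whose boundary is >= col (bisect_left)
--     lo, hi = 0, len(boundaries)
--     while lo < hi:
--         mid = (lo + hi) // 2
--         if boundaries[mid] < col:
--             lo = mid + 1
--         else:
--             hi = mid
--     return min(lo, len(words) - 1)
-- ===== Notes on version B (the rewrite author's own statement) =====
-- stated objective: alternative
-- what changed: Replaces the linear scan with a precomputed cumulative-boundary list plus a hand-written bisect_left binary search, clamped to len(words)-1 (which also yields -1 on an empty list).
import Mathlib
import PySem

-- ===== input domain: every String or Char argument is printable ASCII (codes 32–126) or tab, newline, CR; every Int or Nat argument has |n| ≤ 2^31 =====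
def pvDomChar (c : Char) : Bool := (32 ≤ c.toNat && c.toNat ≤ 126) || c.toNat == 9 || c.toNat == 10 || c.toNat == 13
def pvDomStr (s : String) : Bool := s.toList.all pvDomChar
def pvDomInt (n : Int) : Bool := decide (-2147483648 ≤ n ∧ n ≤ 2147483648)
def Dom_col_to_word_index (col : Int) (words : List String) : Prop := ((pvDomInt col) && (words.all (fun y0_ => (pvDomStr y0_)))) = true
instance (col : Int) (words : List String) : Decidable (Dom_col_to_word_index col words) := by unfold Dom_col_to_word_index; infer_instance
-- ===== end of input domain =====

-- B replaces A's linear scan by a cumulative-boundary list plus a bisect_left binary search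
-- clamped to len(words)-1 (alternative decomposition; same observable behaviour, total on all inputs).

-- ===== PORT A =====
-- the for-loop of A with its two accumulators `length` and `index`
def colToWordGo (col : Int) (ws : List String) (length index : Int) : Int :=
  match ws with
  | [] => index - 1
  | w :: ws' =>
    let length' := length + PySem.Str.len w
    if col ≤ length' + index then index else colToWordGo col ws' length' (index + 1)

def col_to_word_index (col : Int) (words : List String) : Int :=
  colToWordGo col words 0 0

-- ===== PORT B =====
-- one step of Source B's boundary-building loop: state = (boundaries, total)
def buildStep (st : List Int × Int) (w : String) : List Int × Int :=
  (st.1 ++ [st.2 + PySem.Str.len w + 1], st.2 + PySem.Str.len w + 1)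

-- Source B's while-loop (hand-written bisect_left); (lo+hi)//2 on nonnegative ints is Nat division,
-- and bs[mid] is in range whenever lo < hi ≤ bs.length, so getD is exact here
def bisectGo (bs : List Int) (col : Int) (lo hi : Nat) : Nat :=
  if _h : lo < hi then
    let mid := (lo + hi) / 2
    if bs.getD mid 0 < col then bisectGo bs col (mid + 1) hi
    else bisectGo bs col lo mid
  else lo
termination_by hi - lo
decreasing_by all_goals omega

def col_to_word_index_alt (col : Int) (words : List String) : Int :=
  let bs := (words.foldl buildStep ([], -1)).1
  let lo := bisectGo bs col 0 bs.length
  min (lo : Int) ((words.length : Int) - 1)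

-- ===== PRECONDITION & SPEC =====
def Spec_col_to_word_index (col : Int) (words : List String) (out : Int) : Prop := out = col_to_word_index_alt col words
instance (col : Int) (words : List String) (out : Int) : Decidable (Spec_col_to_word_index col words out) := by unfold Spec_col_to_word_index; infer_instance

-- ===== CLAIM (what is proved, stated in full; the proofs are below) =====
def Claim_equal_col_to_word_index : Prop := ∀ (col : Int) (words : List String), Dom_col_to_word_index col words → Spec_col_to_word_index col words (col_to_word_index col words)

-- ===== LEMMAS AND PROOFS =====

-- boundaries of ws starting at offset `off`: entry i is off + Σ len(ws[0..i]) + i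
def bnd (off : Int) : List String → List Int
  | [] => []
  | w :: ws => (off + PySem.Str.len w) :: bnd (off + PySem.Str.len w + 1) ws

-- first index whose boundary is ≥ col (length of the list if none)
def firstGE (col : Int) : List Int → Nat
  | [] => 0
  | b :: bs => if col ≤ b then 0 else firstGE col bs + 1

lemma strLen_nonneg (w : String) : 0 ≤ PySem.Str.len w := by
  rw [PySem.Str.len_eq]; positivity

lemma build_eq (ws : List String) : ∀ (acc : List Int) (t : Int),
    (ws.foldl buildStep (acc, t)).1 = acc ++ bnd (t + 1) ws := by
  induction ws with
  | nil => intro acc t; simp [bnd]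
  | cons w ws ih =>
    intro acc t
    have h1 : t + PySem.Str.len w + 1 = (t + 1) + PySem.Str.len w := by ring
    simp only [List.foldl_cons, buildStep, ih, bnd]
    rw [h1]
    simp

lemma bnd_length (ws : List String) : ∀ off, (bnd off ws).length = ws.length := by
  induction ws with
  | nil => intro off; simp [bnd]
  | cons w ws ih => intro off; simp [bnd, ih]

lemma le_of_mem_bnd (ws : List String) : ∀ off x, x ∈ bnd off ws → off ≤ x := by
  induction ws with
  | nil => intro off x hx; simp [bnd] at hx
  | cons w ws ih =>
    intro off x hx
    have hw := strLen_nonneg w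
    simp only [bnd, List.mem_cons] at hx
    rcases hx with h | h
    · omega
    · have := ih (off + PySem.Str.len w + 1) x h; omega

lemma bnd_pairwise (ws : List String) : ∀ off, List.Pairwise (· ≤ ·) (bnd off ws) := by
  induction ws with
  | nil => intro off; simp [bnd]
  | cons w ws ih =>
    intro off
    refine List.pairwise_cons.mpr ⟨?_, ih _⟩
    intro x hx
    have := le_of_mem_bnd ws (off + PySem.Str.len w + 1) x hx
    omega

lemma sorted_getD {bs : List Int} (hs : List.Pairwise (· ≤ ·) bs)
    {i j : Nat} (hij : i ≤ j) (hj : j < bs.length) : bs.getD i 0 ≤ bs.getD j 0 := by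
  rcases Nat.lt_or_ge i j with h | h
  · have hi : i < bs.length := lt_trans h hj
    have := (List.pairwise_iff_getElem.mp hs) i j hi hj h
    rwa [List.getD_eq_getElem _ _ hi, List.getD_eq_getElem _ _ hj]
  · have : i = j := le_antisymm hij h
    subst this; exact le_refl _

lemma firstGE_le_length (col : Int) (bs : List Int) : firstGE col bs ≤ bs.length := by
  induction bs with
  | nil => simp [firstGE]
  | cons b bs ih =>
    simp only [firstGE, List.length_cons]
    split <;> omega

lemma firstGE_lt (col : Int) (bs : List Int) :
    ∀ j, j < firstGE col bs → bs.getD j 0 < col := by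
  induction bs with
  | nil => intro j hj; simp [firstGE] at hj
  | cons b bs ih =>
    intro j hj
    simp only [firstGE] at hj
    by_cases h : col ≤ b
    · simp [h] at hj
    · simp only [h, if_false] at hj
      cases j with
      | zero => simp only [List.getD_cons_zero]; omega
      | succ j => simp only [List.getD_cons_succ]; exact ih j (by omega)

lemma firstGE_ge (col : Int) (bs : List Int) (h : firstGE col bs < bs.length) :
    col ≤ bs.getD (firstGE col bs) 0 := by
  induction bs with
  | nil => simp [firstGE] at h
  | cons b bs ih =>
    by_cases hb : col ≤ b
    · simp [firstGE, hb]
    · simp only [firstGE, hb, if_false] at h ⊢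
      simp only [List.getD_cons_succ]
      exact ih (by simpa using Nat.lt_of_succ_lt_succ h)

lemma bisect_inv (col : Int) (bs : List Int) (hs : List.Pairwise (· ≤ ·) bs) :
    ∀ (n lo hi : Nat), hi - lo ≤ n → lo ≤ hi → hi ≤ bs.length →
    (∀ j, j < lo → bs.getD j 0 < col) →
    (∀ j, hi ≤ j → j < bs.length → col ≤ bs.getD j 0) →
    bisectGo bs col lo hi ≤ bs.length ∧
    (∀ j, j < bisectGo bs col lo hi → bs.getD j 0 < col) ∧
    (∀ j, bisectGo bs col lo hi ≤ j → j < bs.length → col ≤ bs.getD j 0) := by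
  intro n
  induction n with
  | zero =>
    intro lo hi hn hle hhi hPlo hPhi
    have heq : lo = hi := by omega
    subst heq
    rw [bisectGo]
    rw [dif_neg (lt_irrefl lo)]
    exact ⟨hhi, hPlo, hPhi⟩
  | succ n ih =>
    intro lo hi hn hle hhi hPlo hPhi
    rw [bisectGo]
    by_cases h : lo < hi
    · simp only [h, dif_pos]
      set mid := (lo + hi) / 2 with hmid
      have hmlo : lo ≤ mid := by omega
      have hmhi : mid < hi := by omega
      have hmlen : mid < bs.length := lt_of_lt_of_le hmhi hhi
      by_cases hc : bs.getD mid 0 < col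
      · simp only [hc, if_pos]
        apply ih (mid + 1) hi (by omega) (by omega) hhi
        · intro j hj
          rcases Nat.lt_or_ge j lo with h' | h'
          · exact hPlo j h'
          · exact lt_of_le_of_lt (sorted_getD hs (by omega) hmlen) hc
        · exact hPhi
      · simp only [hc, if_neg, not_false_iff]
        apply ih lo mid (by omega) (by omega) (le_of_lt hmlen)
        · exact hPlo
        · intro j hj hjlen
          exact le_trans (not_lt.mp hc) (sorted_getD hs hj hjlen)
    · simp only [h, dif_neg, not_false_iff]
      have heq : lo = hi := by omega
      subst heq
      exact ⟨hhi, hPlo, hPhi⟩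

lemma bisect_eq_firstGE (col : Int) (bs : List Int) (hs : List.Pairwise (· ≤ ·) bs) :
    bisectGo bs col 0 bs.length = firstGE col bs := by
  obtain ⟨hle, hlt, hge⟩ :=
    bisect_inv col bs hs bs.length 0 bs.length (by omega) (by omega) (le_refl _)
      (fun j hj => absurd hj (Nat.not_lt_zero j))
      (fun j hj hjlen => absurd hjlen (by omega))
  set r := bisectGo bs col 0 bs.length
  have hf := firstGE_le_length col bs
  rcases Nat.lt_trichotomy r (firstGE col bs) with h | h | h
  · -- r < f : col ≤ bs[r] but bs[r] < col
    have h1 : col ≤ bs.getD r 0 := hge r (le_refl _) (by omega)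
    have h2 : bs.getD r 0 < col := firstGE_lt col bs r h
    omega
  · exact h
  · -- f < r : bs[f] < col but col ≤ bs[f]
    have h1 : bs.getD (firstGE col bs) 0 < col := hlt _ h
    have h2 : col ≤ bs.getD (firstGE col bs) 0 := firstGE_ge col bs (by omega)
    omega

lemma goA_eq (col : Int) (ws : List String) : ∀ (L I : Int),
    colToWordGo col ws L I =
      if firstGE col (bnd (L + I) ws) < ws.length
      then I + (firstGE col (bnd (L + I) ws) : Int)
      else I + (ws.length : Int) - 1 := by
  induction ws with
  | nil => intro L I; simp [colToWordGo, bnd, firstGE]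
  | cons w ws ih =>
    intro L I
    simp only [colToWordGo, bnd, firstGE]
    by_cases h : col ≤ L + PySem.Str.len w + I
    · rw [if_pos h, if_pos (show col ≤ L + I + PySem.Str.len w by omega)]
      simp
    · rw [if_neg h, if_neg (show ¬ col ≤ L + I + PySem.Str.len w by omega)]
      rw [ih (L + PySem.Str.len w) (I + 1)]
      rw [show L + PySem.Str.len w + (I + 1) = L + I + PySem.Str.len w + 1 from by ring]
      simp only [List.length_cons]
      split_ifs <;> push_cast <;> omega

-- ===== VERDICT (by name: the statement is the Claim_ definition above) =====
theorem col_to_word_index_spec : Claim_equal_col_to_word_index := by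
  intro col words _
  have hbs : (words.foldl buildStep ([], -1)).1 = bnd 0 words := by
    simp [build_eq words [] (-1)]
  simp only [Spec_col_to_word_index, col_to_word_index, col_to_word_index_alt, hbs]
  rw [goA_eq col words 0 0,
      show (0 : Int) + 0 = 0 from by norm_num,
      bisect_eq_firstGE col (bnd 0 words) (bnd_pairwise words 0)]
  have hlen := bnd_length words 0
  have hfle := firstGE_le_length col (bnd 0 words)
  rw [hlen] at hfle
  by_cases h : firstGE col (bnd 0 words) < words.length
  · rw [if_pos h, min_eq_left (by omega : (firstGE col (bnd 0 words) : Int) ≤ (words.length : Int) - 1)]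
    omega
  · rw [if_neg h]
    have hf : firstGE col (bnd 0 words) = words.length := by omega
    rw [hf, min_eq_right (by omega : ((words.length : Int) - 1) ≤ ((words.length : Int)))]
    omega
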